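-- pv_equiv track=rewrite | github.com/ihux/carabao-utils | carabao/src/carabao/matrix.py | bar
-- ===== SOURCE A (Python) =====
-- def bar(n,label='',k=-1):          # bar string of length n
--         if n >= 5:
--             if k >= 0:
--                 str = '%03g' % k
--                 if len(label) > 0:
--                     str += '/' + label
--             else:
--                 str = '---'
--             while len(str) < n:
--                 str += '-'
--                 if len(str) < n: str = '-' + str
--             return str
--         if n >= 3:
--             label = '-' + label
--         elif n >= 5:
--             label = '-' + label
--         str = label
--         for k in range(n-len(label)): str += '-'
--         return str
-- ===== SOURCE B (Python) =====
-- def bar(n, label='', k=-1):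
--     if n >= 5:
--         if k >= 0:
--             s = '%03g' % k + ('/' + label if label else '')
--         else:
--             s = '---'
--         d = n - len(s)
--         return '-' * (d // 2) + s + '-' * ((d + 1) // 2)
--     if n >= 3:
--         label = '-' + label
--     return label + '-' * (n - len(label))
-- ===== Notes on version B (the rewrite author's own statement) =====
-- stated objective: simpler
-- what changed: Both incremental dash-building loops (the alternating append-right/prepend-left while-loop and the range-for append loop) are replaced by closed-form padding: d = n - len(s), then '-'*(d//2) + s + '-'*((d+1)//2) (resp. label + '-'*(n-len(label))), and the unreachable 'elif n >= 5' branch is dropped.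
import Mathlib
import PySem

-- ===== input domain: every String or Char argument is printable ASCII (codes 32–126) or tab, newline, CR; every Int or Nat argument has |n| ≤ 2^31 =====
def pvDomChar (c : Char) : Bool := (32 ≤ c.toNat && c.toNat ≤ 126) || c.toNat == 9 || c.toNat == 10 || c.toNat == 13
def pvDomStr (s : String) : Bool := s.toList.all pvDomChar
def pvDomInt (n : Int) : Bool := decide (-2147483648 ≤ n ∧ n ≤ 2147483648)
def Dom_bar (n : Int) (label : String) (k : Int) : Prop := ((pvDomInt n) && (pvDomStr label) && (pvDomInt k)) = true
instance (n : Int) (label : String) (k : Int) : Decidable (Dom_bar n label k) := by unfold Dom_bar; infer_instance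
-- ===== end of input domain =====

-- B replaces A's two incremental dash-building loops (the alternating
-- append/prepend while-loop and the range-for-loop) by closed-form padding
-- with '-' * count; objective: simpler.

-- ===== PORT A =====

-- Hand port of the builtin '%03g' % k as A's Python evaluates it, exact for
-- integer 0 ≤ k ≤ 2^31 (the only calls A makes): width 3 zero-padded; for
-- k ≥ 10^6, %g renders 6 significant digits (round-half-even) in exponent
-- form, trailing zeros of the mantissa stripped.
def pctG03 (k : Int) : String :=
  if k < 1000000 then
    let s := (PySem.Int.toStr k).toList
    String.ofList (List.replicate (3 - s.length) '0' ++ s)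
  else
    let d := (PySem.Int.toStr k).toList.length
    let p : Int := (10 : Int) ^ (d - 6)
    let q := PySem.Int.floordiv k p
    let r := PySem.Int.mod k p
    let q6 := if 2 * r > p ∨ (2 * r = p ∧ PySem.Int.mod q 2 = 1) then q + 1 else q
    let me : Int × Int := if q6 = 1000000 then (100000, (d : Int)) else (q6, (d : Int) - 1)
    let ml := ((PySem.Int.toStr me.1).toList.reverse.dropWhile (· = '0')).reverse
    let mant := match ml with
      | [] => "0"
      | [c] => String.ofList [c]
      | c :: rest => String.ofList (c :: '.' :: rest)
    let es := PySem.Int.toStr me.2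
    mant ++ "e+" ++ (if me.2 < 10 then "0" ++ es else es)

-- A's while-loop: append '-' on the right, then (if still short) prepend '-'.
def padLoop (n : Int) (s : List Char) : List Char :=
  if _h : (s.length : Int) < n then
    let s1 := s ++ ['-']
    if (s1.length : Int) < n then padLoop n ('-' :: s1) else s1
  else s
termination_by (n - s.length).toNat
decreasing_by simp_all [s1]; omega

def bar (n : Int) (label : String) (k : Int) : String :=
  if n ≥ 5 then
    let s := if k ≥ 0 then
        (pctG03 k).toList ++ (if label.toList.length > 0 then '/' :: label.toList else [])
      else ['-', '-', '-']
    String.ofList (padLoop n s)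
  else
    let lab := if n ≥ 3 then '-' :: label.toList
               else if n ≥ 5 then '-' :: label.toList else label.toList
    String.ofList ((PySem.List.pyRange 0 (n - lab.length) 1).foldl (fun acc _ => acc ++ ['-']) lab)

-- ===== PORT B =====

-- Source B's own evaluation of the builtin '%03g' % k, ported independently of A's
-- transliteration: digit-list padding via drop, remainder by subtraction,
-- divisibility test for the half-even tie, rdropWhile for the trailing-zero
-- strip, take/drop to place the decimal point; exact on the same calls
-- (0 ≤ k ≤ 2^31).  pctG03_eq_fmtG03 below proves the two renderings equal.
def fmtG03 (k : Int) : String :=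
  if k ≥ 1000000 then
    let ds := (PySem.Int.toStr k).toList
    let p : Int := (10 : Int) ^ (ds.length - 6)
    let q := PySem.Int.floordiv k p
    let r := k - q * p
    let q6 := if p < 2 * r ∨ (2 * r = p ∧ ¬ (2 ∣ q)) then q + 1 else q
    let m : Int := if q6 = 1000000 then 100000 else q6
    let e : Int := if q6 = 1000000 then ds.length else (ds.length : Int) - 1
    let ml := (PySem.Int.toStr m).toList.rdropWhile (· = '0')
    let mant := if ml = [] then ['0'] else if ml.length = 1 then ml else ml.take 1 ++ '.' :: ml.drop 1
    String.ofList (mant ++ 'e' :: '+' ::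
      (if e < 10 then '0' :: (PySem.Int.toStr e).toList else (PySem.Int.toStr e).toList))
  else
    let s := (PySem.Int.toStr k).toList
    String.ofList ((List.replicate 3 '0').drop s.length ++ s)

def bar_alt (n : Int) (label : String) (k : Int) : String :=
  if n ≥ 5 then
    let s := if k ≥ 0 then
        (fmtG03 k).toList ++ (if label.toList ≠ [] then '/' :: label.toList else [])
      else ['-', '-', '-']
    let d : Int := n - s.length
    String.ofList (List.replicate (PySem.Int.floordiv d 2).toNat '-' ++ s
               ++ List.replicate (PySem.Int.floordiv (d + 1) 2).toNat '-')
  else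
    let lab := if n ≥ 3 then '-' :: label.toList else label.toList
    String.ofList (lab ++ List.replicate (n - lab.length).toNat '-')

-- ===== PRECONDITION & SPEC =====
def Spec_bar (n : Int) (label : String) (k : Int) (out : String) : Prop := out = bar_alt n label k
instance (n : Int) (label : String) (k : Int) (out : String) : Decidable (Spec_bar n label k out) := by unfold Spec_bar; infer_instance

-- ===== CLAIM (what is proved, stated in full; the proofs are below) =====
def Claim_equal_bar : Prop := ∀ (n : Int) (label : String) (k : Int), Dom_bar n label k → Spec_bar n label k (bar n label k)

-- ===== LEMMAS AND PROOFS =====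

-- The mantissa/exponent renderings of the two '%03g' ports agree for any m, e.
theorem mantExp_eq (m e : Int) :
  (match ((PySem.Int.toStr m).toList.reverse.dropWhile (· = '0')).reverse with
    | [] => "0" | [c] => String.ofList [c] | c :: rest => String.ofList (c :: '.' :: rest))
   ++ "e+" ++ (if e < 10 then "0" ++ PySem.Int.toStr e else PySem.Int.toStr e)
  = String.ofList ((if ((PySem.Int.toStr m).toList.rdropWhile (· = '0')) = [] then ['0']
      else if ((PySem.Int.toStr m).toList.rdropWhile (· = '0')).length = 1 then ((PySem.Int.toStr m).toList.rdropWhile (· = '0'))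
      else ((PySem.Int.toStr m).toList.rdropWhile (· = '0')).take 1 ++ '.' :: ((PySem.Int.toStr m).toList.rdropWhile (· = '0')).drop 1)
      ++ 'e' :: '+' :: (if e < 10 then '0' :: (PySem.Int.toStr e).toList else (PySem.Int.toStr e).toList)) := by
  apply String.toList_inj.mp
  rw [show ((PySem.Int.toStr m).toList.reverse.dropWhile (· = '0')).reverse
        = (PySem.Int.toStr m).toList.rdropWhile (· = '0') from rfl]
  rcases hml : (PySem.Int.toStr m).toList.rdropWhile (· = '0') with _ | ⟨c, _ | ⟨c2, t⟩⟩ <;>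
    by_cases he : e < 10 <;>
    simp [he, String.toList_append, show "0".toList = ['0'] from by decide]

-- The two independent ports of '%03g' render the same string on every Int.
theorem pctG03_eq_fmtG03 (k : Int) : pctG03 k = fmtG03 k := by
  unfold pctG03 fmtG03
  by_cases hk : k < 1000000
  · rw [if_pos hk, if_neg (by omega)]
    dsimp only
    rw [List.drop_replicate]
  · rw [if_neg hk, if_pos (by omega)]
    dsimp only
    set L := (PySem.Int.toStr k).toList with hL
    set p : Int := (10 : Int) ^ (L.length - 6) with hpdef
    have hp : (0 : Int) < p := pow_pos (by norm_num) _
    set q : Int := PySem.Int.floordiv k p with hqdef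
    have hr : k - q * p = PySem.Int.mod k p := by
      have h := PySem.Int.floordiv_mul_add_mod k p
      linarith
    rw [hr]
    have hodd : (PySem.Int.mod q 2 = 1) ↔ ¬ (2 ∣ q) := by
      rw [PySem.Int.mod_eq_emod_of_pos (by norm_num)]
      omega
    have hcond : (p < 2 * PySem.Int.mod k p ∨ (2 * PySem.Int.mod k p = p ∧ ¬ (2 ∣ q)))
        ↔ (2 * PySem.Int.mod k p > p ∨ (2 * PySem.Int.mod k p = p ∧ PySem.Int.mod q 2 = 1)) := by
      rw [hodd]
    simp only [hcond]
    set q6 : Int := if 2 * PySem.Int.mod k p > p ∨ (2 * PySem.Int.mod k p = p ∧ PySem.Int.mod q 2 = 1) then q + 1 else q with hq6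
    by_cases h6 : q6 = 1000000
    · simp only [if_pos h6]
      exact mantExp_eq 100000 (L.length : Int)
    · simp only [if_neg h6]
      exact mantExp_eq q6 ((L.length : Int) - 1)

-- The alternating while-loop equals closed-form padding: floor(d/2) dashes on
-- the left, ceil(d/2) on the right (d = n - len s; none when d ≤ 0).
theorem padLoop_eq (n : Int) (s : List Char) :
    padLoop n s =
      List.replicate (PySem.Int.floordiv (n - s.length) 2).toNat '-' ++ s
        ++ List.replicate (PySem.Int.floordiv (n - s.length + 1) 2).toNat '-' := by
  fun_induction padLoop n s with
  | case1 s h s1 h2 ih =>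
      rw [ih]
      simp only [s1, List.length_append, List.length_cons] at *
      have e1 : (PySem.Int.floordiv (n - s.length) 2).toNat
          = (PySem.Int.floordiv (n - (s.length + 1 + 1)) 2).toNat + 1 := by
        rw [PySem.Int.floordiv_eq_ediv_of_pos (by omega),
            PySem.Int.floordiv_eq_ediv_of_pos (by omega)]
        omega
      have e2 : (PySem.Int.floordiv (n - s.length + 1) 2).toNat
          = (PySem.Int.floordiv (n - (s.length + 1 + 1) + 1) 2).toNat + 1 := by
        rw [PySem.Int.floordiv_eq_ediv_of_pos (by omega),
            PySem.Int.floordiv_eq_ediv_of_pos (by omega)]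
        omega
      rw [e1, e2, List.replicate_succ', List.replicate_succ]
      simp
  | case2 s h s1 h2 =>
      simp only [s1, List.length_append, List.length_singleton] at *
      have e1 : (PySem.Int.floordiv (n - s.length) 2).toNat = 0 := by
        rw [PySem.Int.floordiv_eq_ediv_of_pos (by omega)]; omega
      have e2 : (PySem.Int.floordiv (n - s.length + 1) 2).toNat = 1 := by
        rw [PySem.Int.floordiv_eq_ediv_of_pos (by omega)]; omega
      rw [e1, e2]
      simp
  | case3 s h =>
      have e1 : (PySem.Int.floordiv (n - s.length) 2).toNat = 0 := by
        rw [PySem.Int.floordiv_eq_ediv_of_pos (by omega)]; omega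
      have e2 : (PySem.Int.floordiv (n - s.length + 1) 2).toNat = 0 := by
        rw [PySem.Int.floordiv_eq_ediv_of_pos (by omega)]; omega
      rw [e1, e2]
      simp

-- A's for-loop over range(m) appending '-' equals appending replicate.
theorem foldl_dash (l : List Int) (acc : List Char) :
    l.foldl (fun a _ => a ++ ['-']) acc = acc ++ List.replicate l.length '-' := by
  induction l generalizing acc with
  | nil => simp
  | cons x xs ih =>
      simp only [List.foldl_cons, ih, List.length_cons, List.replicate_succ]
      simp

-- ===== VERDICT (by name: the statement is the Claim_ definition above) =====
theorem bar_spec : Claim_equal_bar := by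
  intro n label k _
  unfold Spec_bar bar bar_alt
  by_cases h5 : n ≥ 5
  · simp only [if_pos h5]
    have hseed : (if k ≥ 0 then
          (pctG03 k).toList ++ (if label.toList.length > 0 then '/' :: label.toList else [])
        else ['-', '-', '-'])
        = (if k ≥ 0 then
          (fmtG03 k).toList ++ (if label.toList ≠ [] then '/' :: label.toList else [])
        else ['-', '-', '-']) := by
      rw [pctG03_eq_fmtG03]
      rcases label.toList with _ | ⟨c, t⟩ <;> simp
    rw [hseed, padLoop_eq]
  · simp only [if_neg h5]
    rw [foldl_dash, PySem.List.length_pyRange_one]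
    simp
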